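-- pv_equiv track=rewrite | github.com/HyperwaveNetworks/Hyperwave-site | core/security_scanner.py | _get_recommended_action
-- ===== SOURCE A (Python) =====
-- def _get_recommended_action(threats):
--     """Get recommended action based on threat severity"""
--     severities = [threat.get('severity', 'LOW') for threat in threats]
--
--     if 'CRITICAL' in severities:
--         return 'BLOCK_IMMEDIATELY'
--     elif 'HIGH' in severities:
--         return 'BLOCK_AND_MONITOR'
--     elif 'MEDIUM' in severities:
--         return 'MONITOR_CLOSELY'
--     else:
--         return 'LOG_ONLY'
-- ===== SOURCE B (Python) =====
-- _RANK = {'CRITICAL': 3, 'HIGH': 2, 'MEDIUM': 1}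
-- _ACTION = {3: 'BLOCK_IMMEDIATELY', 2: 'BLOCK_AND_MONITOR', 1: 'MONITOR_CLOSELY', 0: 'LOG_ONLY'}
--
-- def _get_recommended_action(threats):
--     best = 0
--     for threat in threats:
--         r = _RANK.get(threat.get('severity', 'LOW'), 0)
--         if r > best:
--             best = r
--     return _ACTION[best]
-- ===== Notes on version B (the rewrite author's own statement) =====
-- stated objective: alternative
-- what changed: Replaces building a severities list and scanning it with three membership tests by a single pass maintaining a running maximum severity rank, then mapping the final rank to its action.
import Mathlib
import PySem

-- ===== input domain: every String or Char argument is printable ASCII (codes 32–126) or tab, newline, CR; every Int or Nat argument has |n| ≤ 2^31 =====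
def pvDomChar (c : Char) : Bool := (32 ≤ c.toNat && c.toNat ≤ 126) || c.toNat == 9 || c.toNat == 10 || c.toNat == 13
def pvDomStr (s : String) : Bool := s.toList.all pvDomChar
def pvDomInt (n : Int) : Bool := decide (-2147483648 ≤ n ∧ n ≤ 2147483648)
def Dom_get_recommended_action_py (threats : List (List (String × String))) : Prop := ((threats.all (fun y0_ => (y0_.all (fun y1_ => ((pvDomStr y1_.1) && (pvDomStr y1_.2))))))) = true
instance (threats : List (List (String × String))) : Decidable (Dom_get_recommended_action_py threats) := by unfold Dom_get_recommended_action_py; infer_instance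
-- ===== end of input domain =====

-- B replaces A's severity-list build plus three membership scans with one pass keeping a running maximum severity rank, mapped to an action at the end (alternative decomposition, same cost).
-- ===== PORT A =====
-- threat.get('severity', 'LOW') (shared by both Pythons, ported once; Dict.mk keeps first-match lookup)
def pvSevOf (t : List (String × String)) : String :=
  (PySem.Dict.mk t).getD "severity" "LOW"

def get_recommended_action_py (threats : List (List (String × String))) : String :=
  let severities := threats.map (fun threat => pvSevOf threat)
  if "CRITICAL" ∈ severities then "BLOCK_IMMEDIATELY"
  else if "HIGH" ∈ severities then "BLOCK_AND_MONITOR"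
  else if "MEDIUM" ∈ severities then "MONITOR_CLOSELY"
  else "LOG_ONLY"

-- ===== PORT B =====
def pvRank (s : String) : Int :=
  if s = "CRITICAL" then 3 else if s = "HIGH" then 2 else if s = "MEDIUM" then 1 else 0

def pvAction (m : Int) : String :=
  if m = 3 then "BLOCK_IMMEDIATELY"
  else if m = 2 then "BLOCK_AND_MONITOR"
  else if m = 1 then "MONITOR_CLOSELY"
  else "LOG_ONLY"

def get_recommended_action_py_alt (threats : List (List (String × String))) : String :=
  pvAction (threats.foldl (fun best threat =>
    let r := pvRank (pvSevOf threat)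
    if r > best then r else best) 0)

-- ===== PRECONDITION & SPEC =====
def Spec_get_recommended_action_py (threats : List (List (String × String))) (out : String) : Prop := out = get_recommended_action_py_alt threats
instance (threats : List (List (String × String))) (out : String) : Decidable (Spec_get_recommended_action_py threats out) := by unfold Spec_get_recommended_action_py; infer_instance

-- ===== CLAIM (what is proved, stated in full; the proofs are below) =====
def Claim_equal_get_recommended_action_py : Prop := ∀ (threats : List (List (String × String))), Dom_get_recommended_action_py threats → Spec_get_recommended_action_py threats (get_recommended_action_py threats)

-- ===== LEMMAS AND PROOFS =====
-- the supremum of the ranks of a severity list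
def pvSup (sevs : List String) : Int := sevs.foldr (fun s acc => max (pvRank s) acc) 0

lemma pvRank_nonneg (s : String) : 0 ≤ pvRank s := by
  unfold pvRank; split_ifs <;> norm_num

lemma pvSup_nonneg (sevs : List String) : 0 ≤ pvSup sevs := by
  induction sevs with
  | nil => simp [pvSup]
  | cons s r ih => simp only [pvSup, List.foldr] at *; exact le_max_of_le_right ih

lemma pvSup_le_three (sevs : List String) : pvSup sevs ≤ 3 := by
  induction sevs with
  | nil => simp [pvSup]
  | cons s r ih =>
    simp only [pvSup, List.foldr] at *
    refine max_le ?_ ih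
    unfold pvRank; split_ifs <;> norm_num

lemma pvFold_eq_sup (sevs : List String) (m : Int) (hm : 0 ≤ m) :
    sevs.foldl (fun best s => let r := pvRank s; if r > best then r else best) m
      = max m (max 0 (pvSup sevs)) := by
  induction sevs generalizing m with
  | nil => simp only [List.foldl, pvSup, List.foldr]; omega
  | cons s r ih =>
    simp only [List.foldl, pvSup, List.foldr] at *
    have hr := pvRank_nonneg s
    rw [ih _ (by split_ifs <;> omega)]
    have hs := pvSup_nonneg r
    simp only [pvSup] at hs
    split_ifs <;> omega

lemma pvRank_ge_three_iff (s : String) : 3 ≤ pvRank s ↔ s = "CRITICAL" := by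
  unfold pvRank; split_ifs with h1 h2 h3 <;> simp_all

lemma pvRank_ge_two_iff (s : String) : 2 ≤ pvRank s ↔ s = "CRITICAL" ∨ s = "HIGH" := by
  unfold pvRank; split_ifs with h1 h2 h3 <;> simp_all

lemma pvRank_ge_one_iff (s : String) : 1 ≤ pvRank s ↔ s = "CRITICAL" ∨ s = "HIGH" ∨ s = "MEDIUM" := by
  unfold pvRank; split_ifs with h1 h2 h3 <;> simp_all

lemma pvSup_ge_iff (sevs : List String) (k : Int) (hk : 0 < k) :
    k ≤ pvSup sevs ↔ ∃ s ∈ sevs, k ≤ pvRank s := by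
  induction sevs with
  | nil => simp only [pvSup, List.foldr, List.not_mem_nil]; constructor
           · intro h; omega
           · rintro ⟨s, hs, -⟩; exact absurd hs (by simp)
  | cons s r ih =>
    simp only [pvSup, List.foldr] at *
    rw [le_max_iff, ih]
    simp [or_and_right, exists_or]

theorem pv_ab_eq (threats : List (List (String × String))) :
    get_recommended_action_py threats = get_recommended_action_py_alt threats := by
  unfold get_recommended_action_py get_recommended_action_py_alt
  rw [show (threats.foldl (fun best threat =>
      let r := pvRank (pvSevOf threat); if r > best then r else best) 0)
    = (threats.map (fun threat => pvSevOf threat)).foldl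
        (fun best s => let r := pvRank s; if r > best then r else best) 0 by
      rw [List.foldl_map]]
  set sevs := threats.map (fun threat => pvSevOf threat) with hsevs
  rw [pvFold_eq_sup sevs 0 le_rfl]
  have hge := pvSup_nonneg sevs
  have hle := pvSup_le_three sevs
  rw [show max (0:Int) (max 0 (pvSup sevs)) = pvSup sevs by omega]
  have h3 : 3 ≤ pvSup sevs ↔ "CRITICAL" ∈ sevs := by
    rw [pvSup_ge_iff sevs 3 (by norm_num)]
    constructor
    · rintro ⟨s, hs, hr⟩; rwa [(pvRank_ge_three_iff s).mp hr] at hs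
    · intro h; exact ⟨_, h, by simp [pvRank]⟩
  have h2 : 2 ≤ pvSup sevs ↔ ("CRITICAL" ∈ sevs ∨ "HIGH" ∈ sevs) := by
    rw [pvSup_ge_iff sevs 2 (by norm_num)]
    constructor
    · rintro ⟨s, hs, hr⟩
      rcases (pvRank_ge_two_iff s).mp hr with h | h <;> [left; right] <;> rwa [h] at hs
    · rintro (h | h)
      · exact ⟨_, h, by simp [pvRank]⟩
      · exact ⟨_, h, by simp [pvRank]⟩
  have h1 : 1 ≤ pvSup sevs ↔ ("CRITICAL" ∈ sevs ∨ "HIGH" ∈ sevs ∨ "MEDIUM" ∈ sevs) := by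
    rw [pvSup_ge_iff sevs 1 (by norm_num)]
    constructor
    · rintro ⟨s, hs, hr⟩
      rcases (pvRank_ge_one_iff s).mp hr with h | h | h
      · exact Or.inl (h ▸ hs)
      · exact Or.inr (Or.inl (h ▸ hs))
      · exact Or.inr (Or.inr (h ▸ hs))
    · rintro (h | h | h)
      · exact ⟨_, h, by simp [pvRank]⟩
      · exact ⟨_, h, by simp [pvRank]⟩
      · exact ⟨_, h, by simp [pvRank]⟩
  by_cases hc : "CRITICAL" ∈ sevs
  · have e : pvSup sevs = 3 := le_antisymm hle (h3.mpr hc)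
    rw [e]; simp [hc, pvAction]
  · by_cases hh : "HIGH" ∈ sevs
    · have hn3 : ¬ 3 ≤ pvSup sevs := fun h => hc (h3.mp h)
      have := h2.mpr (Or.inr hh)
      have e : pvSup sevs = 2 := by omega
      rw [e]; simp [hc, hh, pvAction]
    · by_cases hm : "MEDIUM" ∈ sevs
      · have hn2 : ¬ 2 ≤ pvSup sevs := by
          intro h; rcases h2.mp h with h' | h' <;> [exact hc h'; exact hh h']
        have := h1.mpr (Or.inr (Or.inr hm))
        have e : pvSup sevs = 1 := by omega
        rw [e]; simp [hc, hh, hm, pvAction]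
      · have hn1 : ¬ 1 ≤ pvSup sevs := by
          intro h; rcases h1.mp h with h' | h' | h'
          · exact hc h'
          · exact hh h'
          · exact hm h'
        have e : pvSup sevs = 0 := by omega
        rw [e]; simp [hc, hh, hm, pvAction]

-- ===== VERDICT (by name: the statement is the Claim_ definition above) =====
theorem get_recommended_action_py_spec : Claim_equal_get_recommended_action_py := by
  intro threats _
  exact pv_ab_eq threats
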